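-- pv_equiv track=rewrite | github.com/ji-min0/python_chall | 프로그래머스/0/120956. 옹알이 （1）/옹알이 （1）.py | solution
-- ===== SOURCE A (Python) =====
-- sounds = ["aya", "ye", "woo", "ma"]
--
-- def solution(babbling):
--     answer = 0
--
--     for word in babbling:
--         used = set()
--         for s in sounds:
--             if s in word and s not in used:
--                 used.add(s)
--
--         index = 0
--         while index < len(word):
--             matched = False
--             possible = True
--
--             for s in used:
--                 if word[index:index+len(s)] == s:
--                     index += len(s)
--                     matched = True
--                     break
--
--             if not matched:
--                 possible = False
--                 break
--
--         if possible:
--             answer += 1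
--
--     return answer
-- ===== SOURCE B (Python) =====
-- # Alternative algorithm: per word, a reachability DP over positions (standard
-- # "can the string be tiled by the allowed sounds" DP) instead of A's
-- # used-set prescan + greedy index scan.
-- SOUNDS = ("aya", "ye", "woo", "ma")
--
-- def _tilable(word):
--     n = len(word)
--     reach = [False] * (n + 1)
--     reach[0] = True
--     for i in range(n):
--         if reach[i]:
--             for s in SOUNDS:
--                 if word.startswith(s, i):
--                     reach[i + len(s)] = True
--     return reach[n]
--
-- def solution(babbling):
--     return sum(1 for word in babbling if _tilable(word))
-- ===== Notes on version B (the rewrite author's own statement) =====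
-- stated objective: alternative
-- what changed: Replaces A's per-word substring prescan into a 'used' set plus greedy while-loop scan (with a stale cross-word 'possible' flag) by a standard tiling-reachability DP over word positions; the count becomes a sum over a comprehension.
-- intended difference: On lists containing an empty word after the first position, A decides each '' by the stale 'possible' flag left over from the previous word's scan (counting it only if that word was splittable), while B counts every '' as the empty concatenation of sounds, which is the intended value. — e.g. on solution(["x", ""]): A returns 0, B returns 1
-- crash fix: When the first word is the empty string A raises UnboundLocalError ('possible' is only assigned inside the while loop, which the empty word skips); B counts the empty word as valid and returns the normal count (1 on ['']). — e.g. on solution([""]): A raises UnboundLocalError, B returns 1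
import Mathlib
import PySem

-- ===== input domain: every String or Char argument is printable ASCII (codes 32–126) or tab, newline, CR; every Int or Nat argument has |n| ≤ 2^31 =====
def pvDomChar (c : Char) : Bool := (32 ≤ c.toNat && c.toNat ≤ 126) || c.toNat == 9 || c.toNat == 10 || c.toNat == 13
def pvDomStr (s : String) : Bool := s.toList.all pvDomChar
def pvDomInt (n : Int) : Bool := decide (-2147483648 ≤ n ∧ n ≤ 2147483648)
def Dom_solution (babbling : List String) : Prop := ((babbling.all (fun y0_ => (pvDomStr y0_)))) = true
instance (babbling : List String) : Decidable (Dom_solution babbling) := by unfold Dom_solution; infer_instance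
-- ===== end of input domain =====

-- B replaces A's used-set prescan + greedy scan by a tiling-reachability DP; equal counts proved on inputs without empty words (D_): on "" A reuses the stale `possible` flag of the previous word, B counts "" as the empty concatenation.

-- ===== PORT A =====
def soundsA : List String := ["aya", "ye", "woo", "ma"]

-- `used = set(); for s in sounds: if s in word and s not in used: used.add(s)`
def buildUsed (word : String) : PySem.Set String :=
  soundsA.foldl (fun used s =>
    if PySem.Str.isIn s word && !(PySem.Set.contains used s) then PySem.Set.add used s else used)
    PySem.Set.empty

-- the `while index < len(word)` loop; fuel = remaining iterations bound (index strictly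
-- increases each pass, so fuel ≥ len - index suffices); `for s in used: … break` is find?
def scanA (word : List Char) (used : List String) (fuel index : Nat) : Bool :=
  if index < word.length then
    match fuel with
    | 0 => false
    | fuel' + 1 =>
      -- word[index:index+len(s)] == s
      match used.find? (fun s =>
          PySem.List.slice word (some (index : Int)) (some ((index : Int) + (s.length : Int))) == s.toList) with
      | some s => scanA word used fuel' (index + s.length)
      | none => false
  else true

-- `answer` and `possible` are function-level variables: `possible` keeps its value from
-- the previous word when the while loop never runs (word = ""); before any word has run
-- the loop Python leaves it UNBOUND (UnboundLocalError) — that state is represented by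
-- the initial `false` and excluded by Pre_ (first word empty).
def solution (babbling : List String) : Int :=
  (babbling.foldl (fun st word =>
    let used := buildUsed word
    let possible := if 0 < word.toList.length then scanA word.toList used word.toList.length 0 else st.2
    (if possible then st.1 + 1 else st.1, possible))
    ((0 : Int), false)).1

-- ===== PORT B =====


-- reach[j] = word[:j] is a concatenation of sounds; word.startswith(s, i) with
-- 0 ≤ i ≤ len(word) is exactly startswith on the dropped tail (exact on that range)
def tilable (word : String) : Bool :=
  let cs := word.toList
  let n := cs.length
  let reach0 := (List.replicate (n + 1) false).set 0 true
  let reach := (List.range n).foldl (fun reach i =>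
    if reach.getD i false then
      (["aya", "ye", "woo", "ma"] : List String).foldl (fun r s =>
        if PySem.Chars.startswith (cs.drop i) s.toList then r.set (i + s.length) true else r) reach
    else reach) reach0
  reach.getD n false

def solution_alt (babbling : List String) : Int :=
  babbling.foldl (fun acc word => acc + (if tilable word then 1 else 0)) 0

-- ===== PRECONDITION & SPEC =====
-- Pre_ excludes exactly the lists whose FIRST word is empty: there the while loop has
-- never run and A raises UnboundLocalError reading the unassigned `possible`.
def Pre_solution (babbling : List String) : Prop := babbling.head? ≠ some ""
instance (babbling : List String) : Decidable (Pre_solution babbling) := by unfold Pre_solution; infer_instance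
def pvWitness_solution : List String := (["aya", "yema", "x"])

-- When the first word is empty A raises UnboundLocalError (`possible` is still unbound);
-- B counts the empty word as a valid (empty) concatenation of sounds and returns normally.
def Raises_solution (babbling : List String) : Prop := babbling.head? = some ""
instance (babbling : List String) : Decidable (Raises_solution babbling) := by unfold Raises_solution; infer_instance
def pvRaiseWitness_solution : List String := ([""])
def pvRaiseWitnessOut_solution : Int := 1

-- On lists containing an empty word (after the first position, else A raises), A decides
-- each "" by the stale `possible` flag left over from the previous word's scan — counting
-- it only if that word was splittable — while B counts every "" as the empty concatenation
-- of sounds, the intended value.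
def D_solution (babbling : List String) : Prop := "" ∈ babbling
instance (babbling : List String) : Decidable (D_solution babbling) := by unfold D_solution; infer_instance

def Spec_solution (babbling : List String) (out : Int) : Prop := ¬ D_solution babbling → out = solution_alt babbling
instance (babbling : List String) (out : Int) : Decidable (Spec_solution babbling out) := by unfold Spec_solution; infer_instance
def pvDiffWitness_solution : List String := (["x", ""])
def pvDiffWitnessOut_solution : Int × Int := (0, 1)

-- ===== CLAIM (what is proved, stated in full; the proofs are below) =====
def Claim_unchanged_solution : Prop := ∀ (babbling : List String), Dom_solution babbling → Pre_solution babbling → Spec_solution babbling (solution babbling)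
def Claim_changed_solution : Prop := Dom_solution (pvDiffWitness_solution) ∧ Pre_solution (pvDiffWitness_solution) ∧ D_solution (pvDiffWitness_solution) ∧ solution (pvDiffWitness_solution) = pvDiffWitnessOut_solution.1 ∧ solution_alt (pvDiffWitness_solution) = pvDiffWitnessOut_solution.2 ∧ pvDiffWitnessOut_solution.1 ≠ pvDiffWitnessOut_solution.2
def Claim_raises_solution : Prop := (∀ (babbling : List String), Dom_solution babbling → Raises_solution babbling → ¬ Pre_solution babbling) ∧ (Dom_solution (pvRaiseWitness_solution) ∧ Raises_solution (pvRaiseWitness_solution) ∧ solution_alt (pvRaiseWitness_solution) = pvRaiseWitnessOut_solution)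

-- ===== LEMMAS AND PROOFS =====

theorem mem_foldl_used (l : List String) (w : String) (s : String) : ∀ (init : List String),
    s ∈ init ∨ (s ∈ l ∧ PySem.Str.isIn s w = true) →
    s ∈ l.foldl (fun used t => if PySem.Str.isIn t w && !(PySem.Set.contains used t) then PySem.Set.add used t else used) init := by
  induction l with
  | nil => intro init h; simpa using h.resolve_right (by simp)
  | cons a l ih =>
    intro init h
    simp only [List.foldl_cons]
    apply ih
    rcases h with h | ⟨hmem, hin⟩
    · left
      split_ifs with hc
      · simp [PySem.Set.add]; split_ifs <;> simp [h]
      · exact h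
    · rcases List.mem_cons.mp hmem with rfl | hl
      · left
        by_cases hc : PySem.Set.contains init s
        · have : s ∈ init := by
            simpa [PySem.Set.contains] using hc
          split_ifs <;> simp [PySem.Set.add, this] <;> split_ifs <;> simp [this]
        · have hnot : s ∉ init := by simpa [PySem.Set.contains] using hc
          have hcond : (PySem.Str.isIn s w && !(PySem.Set.contains init s)) = true := by
            have : s ∉ init := by simpa [PySem.Set.contains] using hc
            simp only [PySem.Str.isIn_eq] at hin
            simp [hin, PySem.Set.contains, this]
          rw [if_pos hcond]
          simp [PySem.Set.add, PySem.Set.contains, hnot]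
      · exact Or.inr ⟨hl, hin⟩

theorem foldl_used_sub (l : List String) (w : String) : ∀ (init : List String) (t : String),
    t ∈ l.foldl (fun used t => if PySem.Str.isIn t w && !(PySem.Set.contains used t) then PySem.Set.add used t else used) init →
    t ∈ init ∨ t ∈ l := by
  induction l with
  | nil => intro init t h; simpa using h
  | cons a l ih =>
    intro init t h
    simp only [List.foldl_cons] at h
    rcases ih _ t h with h' | h'
    · split_ifs at h' with hc
      · simp [PySem.Set.add] at h'
        split_ifs at h' with h2
        · exact Or.inl h'
        · rcases List.mem_append.mp h' with h3 | h3
          · exact Or.inl h3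
          · simp at h3; simp [h3]
      · exact Or.inl h'
    · simp [h']

theorem mem_buildUsed {w s : String} (hs : s ∈ soundsA) (hin : PySem.Str.isIn s w = true) :
    s ∈ buildUsed w := mem_foldl_used soundsA w s PySem.Set.empty (Or.inr ⟨hs, hin⟩)

theorem buildUsed_sub {w t : String} (h : t ∈ buildUsed w) : t ∈ soundsA := by
  rcases foldl_used_sub soundsA w PySem.Set.empty t h with h' | h'
  · simp [PySem.Set.empty] at h'
  · exact h'

theorem find?_agree {l₁ l₂ : List String} {p : String → Bool}
    (h₁ : ∀ s ∈ l₁, s ∈ l₂) (h₂ : ∀ s ∈ l₂, p s = true → s ∈ l₁)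
    (huniq : ∀ s ∈ l₂, ∀ t ∈ l₂, p s = true → p t = true → s = t) :
    l₁.find? p = l₂.find? p := by
  cases hf : l₁.find? p with
  | none =>
    have hn := List.find?_eq_none.mp hf
    exact (List.find?_eq_none.mpr (fun x hx hpx => hn x (h₂ x hx hpx) hpx)).symm
  | some s =>
    have hps := List.find?_some hf
    have hs₂ := h₁ s (List.mem_of_find?_eq_some hf)
    cases hg : l₂.find? p with
    | none => exact absurd hps (by simpa using List.find?_eq_none.mp hg s hs₂)
    | some t =>
      rw [huniq t (List.mem_of_find?_eq_some hg) s hs₂ (List.find?_some hg) hps]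

inductive Tl : List Char → Prop
  | nil : Tl []
  | aya (r : List Char) : Tl r → Tl ('a' :: 'y' :: 'a' :: r)
  | ye  (r : List Char) : Tl r → Tl ('y' :: 'e' :: r)
  | woo (r : List Char) : Tl r → Tl ('w' :: 'o' :: 'o' :: r)
  | ma  (r : List Char) : Tl r → Tl ('m' :: 'a' :: r)

theorem take_one_of_take {d : List Char} {k : Nat} {c : Char} {rest : List Char}
    (h : d.take k = c :: rest) : d.take 1 = [c] := by
  cases k with
  | zero => simp at h
  | succ k =>
    cases d with
    | nil => simp at h
    | cons a t => simp only [List.take_succ_cons, List.cons.injEq] at h; simp [h.1]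

-- predicate q: the sound s tiles d at its front

theorem find?_buildUsed (word : String) (index : Nat) :
    (buildUsed word).find? (fun s => ((word.toList.drop index).take s.length == s.toList))
      = soundsA.find? (fun s => ((word.toList.drop index).take s.length == s.toList)) := by
  apply find?_agree (fun s hs => buildUsed_sub hs)
  · intro s hs hp
    apply mem_buildUsed hs
    have hp' : (word.toList.drop index).take s.length = s.toList := by simpa using hp
    have hpre : s.toList <+: word.toList.drop index :=
      List.prefix_iff_eq_take.mpr (by rw [String.length_toList, ← hp'])
    obtain ⟨t, ht⟩ := hpre
    obtain ⟨u, hu⟩ := List.drop_suffix index word.toList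
    have hinf : s.toList <:+: word.toList := ⟨u, t, by rw [← hu, ← ht, List.append_assoc]⟩
    simp [PySem.Chars.isIn_iff_infix, hinf]
  · intro s hs t ht hps hpt
    have hs' : (word.toList.drop index).take s.length = s.toList := by simpa using hps
    have ht' : (word.toList.drop index).take t.length = t.toList := by simpa using hpt
    fin_cases hs <;> fin_cases ht <;> first
      | rfl
      | (exfalso
         have e1 := take_one_of_take hs'
         have e2 := take_one_of_take ht'
         rw [e1] at e2
         revert e2
         decide)

theorem scanA_iff (word : String) : ∀ (fuel index : Nat),
    word.toList.length ≤ index + fuel →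
    ((scanA word.toList (buildUsed word) fuel index = true) ↔ Tl (word.toList.drop index)) := by
  have ha : ("aya" : String).toList = ['a','y','a'] := rfl
  have hal : ("aya" : String).length = 3 := rfl
  have hy : ("ye" : String).toList = ['y','e'] := rfl
  have hyl : ("ye" : String).length = 2 := rfl
  have hw : ("woo" : String).toList = ['w','o','o'] := rfl
  have hwl : ("woo" : String).length = 3 := rfl
  have hm : ("ma" : String).toList = ['m','a'] := rfl
  have hml : ("ma" : String).length = 2 := rfl
  intro fuel
  induction fuel with
  | zero =>
    intro index h
    simp only [Nat.add_zero] at h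
    rw [scanA]
    simp only [Nat.not_lt.mpr h, if_false, List.drop_eq_nil_of_le h]
    exact ⟨fun _ => Tl.nil, fun _ => by trivial⟩
  | succ fuel ih =>
    intro index h
    by_cases hlt : index < word.toList.length
    · rw [scanA]
      simp only [hlt, if_true, PySem.List.slice_natCast_add]
      rw [find?_buildUsed word index]
      have hdE : word.toList.drop index = (word.toList.drop index).take 3 ++ (word.toList.drop index).drop 3 :=
        (List.take_append_drop 3 _).symm
      have hdE2 : word.toList.drop index = (word.toList.drop index).take 2 ++ (word.toList.drop index).drop 2 :=
        (List.take_append_drop 2 _).symm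
      have hdlen : 0 < (word.toList.drop index).length := by
        rw [List.length_drop]; omega
      by_cases h1 : (word.toList.drop index).take 3 = ['a','y','a']
      · have hf : soundsA.find? (fun s => ((word.toList.drop index).take s.length == s.toList)) = some "aya" := by
          simp [soundsA, hal, ha, h1]
        rw [hf]
        show scanA word.toList (buildUsed word) fuel (index + ("aya").length) = true ↔ _
        rw [hal]
        rw [ih (index + 3) (by omega), ← List.drop_drop]
        constructor
        · intro hT
          rw [hdE, h1]
          exact Tl.aya _ hT
        · intro hT
          rw [hdE, h1] at hT
          cases hT with
          | aya r hr => exact hr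
      · by_cases h2 : (word.toList.drop index).take 2 = ['y','e']
        · have hf : soundsA.find? (fun s => ((word.toList.drop index).take s.length == s.toList)) = some "ye" := by
            simp [soundsA, hal, ha, hyl, hy, h1, h2]
          rw [hf]
          show scanA word.toList (buildUsed word) fuel (index + ("ye").length) = true ↔ _
          rw [hyl]
          rw [ih (index + 2) (by omega), ← List.drop_drop]
          constructor
          · intro hT
            rw [hdE2, h2]
            exact Tl.ye _ hT
          · intro hT
            rw [hdE2, h2] at hT
            cases hT with
            | ye r hr => exact hr
        · by_cases h3 : (word.toList.drop index).take 3 = ['w','o','o']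
          · have hf : soundsA.find? (fun s => ((word.toList.drop index).take s.length == s.toList)) = some "woo" := by
              simp [soundsA, hal, ha, hyl, hy, hwl, hw, h1, h2, h3]
            rw [hf]
            show scanA word.toList (buildUsed word) fuel (index + ("woo").length) = true ↔ _
            rw [hwl]
            rw [ih (index + 3) (by omega), ← List.drop_drop]
            constructor
            · intro hT
              rw [hdE, h3]
              exact Tl.woo _ hT
            · intro hT
              rw [hdE, h3] at hT
              cases hT with
              | woo r hr => exact hr
          · by_cases h4 : (word.toList.drop index).take 2 = ['m','a']
            · have hf : soundsA.find? (fun s => ((word.toList.drop index).take s.length == s.toList)) = some "ma" := by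
                simp [soundsA, hal, ha, hyl, hy, hwl, hw, hml, hm, h1, h2, h3, h4]
              rw [hf]
              show scanA word.toList (buildUsed word) fuel (index + ("ma").length) = true ↔ _
              rw [hml]
              rw [ih (index + 2) (by omega), ← List.drop_drop]
              constructor
              · intro hT
                rw [hdE2, h4]
                exact Tl.ma _ hT
              · intro hT
                rw [hdE2, h4] at hT
                cases hT with
                | ma r hr => exact hr
            · have hf : soundsA.find? (fun s => ((word.toList.drop index).take s.length == s.toList)) = none := by
                simp [soundsA, hal, ha, hyl, hy, hwl, hw, hml, hm, h1, h2, h3, h4]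
              rw [hf]
              simp only [Bool.false_eq_true, false_iff]
              intro hT
              generalize hg : word.toList.drop index = d at h1 h2 h3 h4 hdlen hT
              cases hT with
              | nil => simp at hdlen
              | aya r hr => exact h1 (by simp)
              | ye r hr => exact h2 (by simp)
              | woo r hr => exact h3 (by simp)
              | ma r hr => exact h4 (by simp)
    · have hge : word.toList.length ≤ index := Nat.not_lt.mp hlt
      rw [scanA]
      simp only [hlt, if_false, List.drop_eq_nil_of_le hge]
      exact ⟨fun _ => Tl.nil, fun _ => by trivial⟩

def dpStep (cs : List Char) (reach : List Bool) (i : Nat) : List Bool :=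
  if reach.getD i false then
    (["aya", "ye", "woo", "ma"] : List String).foldl (fun r s =>
      if PySem.Chars.startswith (cs.drop i) s.toList then r.set (i + s.length) true else r) reach
  else reach

theorem tilable_def (word : String) : tilable word =
    ((List.range word.toList.length).foldl (dpStep word.toList)
      ((List.replicate (word.toList.length + 1) false).set 0 true)).getD word.toList.length false := rfl

theorem Tl_append {u v : List Char} (hu : Tl u) (hv : Tl v) : Tl (u ++ v) := by
  induction hu with
  | nil => simpa
  | aya r _ ih => exact Tl.aya _ ih
  | ye r _ ih => exact Tl.ye _ ih
  | woo r _ ih => exact Tl.woo _ ih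
  | ma r _ ih => exact Tl.ma _ ih

theorem Tl_last {l : List Char} (h : Tl l) :
    l = [] ∨ ∃ u s, s ∈ soundsA ∧ Tl u ∧ l = u ++ s.toList := by
  induction h with
  | nil => exact Or.inl rfl
  | aya r _ ih =>
    right
    rcases ih with rfl | ⟨u, s, hs, hu, rfl⟩
    · exact ⟨[], "aya", by decide, Tl.nil, rfl⟩
    · exact ⟨'a' :: 'y' :: 'a' :: u, s, hs, Tl.aya _ hu, rfl⟩
  | ye r _ ih =>
    right
    rcases ih with rfl | ⟨u, s, hs, hu, rfl⟩
    · exact ⟨[], "ye", by decide, Tl.nil, rfl⟩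
    · exact ⟨'y' :: 'e' :: u, s, hs, Tl.ye _ hu, rfl⟩
  | woo r _ ih =>
    right
    rcases ih with rfl | ⟨u, s, hs, hu, rfl⟩
    · exact ⟨[], "woo", by decide, Tl.nil, rfl⟩
    · exact ⟨'w' :: 'o' :: 'o' :: u, s, hs, Tl.woo _ hu, rfl⟩
  | ma r _ ih =>
    right
    rcases ih with rfl | ⟨u, s, hs, hu, rfl⟩
    · exact ⟨[], "ma", by decide, Tl.nil, rfl⟩
    · exact ⟨'m' :: 'a' :: u, s, hs, Tl.ma _ hu, rfl⟩

theorem Tl_sound' {s : String} (hs : s ∈ soundsA) : Tl s.toList := by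
  fin_cases hs
  · exact Tl.aya _ Tl.nil
  · exact Tl.ye _ Tl.nil
  · exact Tl.woo _ Tl.nil
  · exact Tl.ma _ Tl.nil

theorem sound_len {s : String} (hs : s ∈ soundsA) : s.length = 2 ∨ s.length = 3 := by
  fin_cases hs
  · exact Or.inr rfl
  · exact Or.inl rfl
  · exact Or.inr rfl
  · exact Or.inl rfl

-- "source step" of the DP invariant

def Src (cs : List Char) (i j : Nat) (s : String) : Prop :=
  s.length ≤ j ∧ j - s.length < i ∧ s.toList <+: cs.drop (j - s.length) ∧ Tl (cs.take (j - s.length))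

def PReach (cs : List Char) (i j : Nat) : Prop := j = 0 ∨ ∃ s ∈ soundsA, Src cs i j s

theorem P_top (cs : List Char) (j : Nat) (hj : j ≤ cs.length) :
    (j = 0 ∨ ∃ s ∈ soundsA, s.length ≤ j ∧ s.toList <+: cs.drop (j - s.length) ∧ Tl (cs.take (j - s.length)))
      ↔ Tl (cs.take j) := by
  constructor
  · rintro (rfl | ⟨s, hs, hk, hpre, hTl⟩)
    · simpa using Tl.nil
    · have hseg : (cs.drop (j - s.length)).take s.length = s.toList := by
        have := List.prefix_iff_eq_take.mp hpre
        rw [String.length_toList] at this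
        exact this.symm
      have : cs.take j = cs.take (j - s.length) ++ (cs.drop (j - s.length)).take s.length := by
        rw [← List.take_add]
        congr 1
        omega
      rw [this, hseg]
      exact Tl_append hTl (Tl_sound' hs)
  · intro hTl
    rcases Tl_last hTl with hnil | ⟨u, s, hs, hu, heq⟩
    · left
      rcases List.take_eq_nil_iff.mp hnil with h | h
      · omega
      · simp [h] at hj; omega
    · right
      have hlen : u.length + s.length = j := by
        have := congrArg List.length heq
        simp [List.length_take, String.length_toList] at this
        omega
      refine ⟨s, hs, by omega, ?_, ?_⟩
      · have hdropeq : s.toList = (cs.drop u.length).take (j - u.length) := by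
          have h1 : (cs.take j).drop u.length = s.toList := by
            rw [heq]; simp
          rw [← h1, List.drop_take]
        have : j - u.length = s.length := by omega
        rw [this] at hdropeq
        have hJ : j - s.length = u.length := by omega
        rw [hJ]
        exact List.prefix_iff_eq_take.mpr (by rw [String.length_toList, ← hdropeq])
      · have hJ : j - s.length = u.length := by omega
        rw [hJ]
        have hueq : u = cs.take u.length := by
          have hupre : u <+: cs.take j := ⟨s.toList, heq.symm⟩
          have := List.prefix_iff_eq_take.mp hupre
          rw [List.take_take] at this
          rwa [Nat.min_eq_left (by omega)] at this
        rw [← hueq]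
        exact hu

theorem src_succ (cs : List Char) (i j : Nat) (s : String) (hTl : Tl (cs.take i)) (hpos : 0 < s.length) :
    Src cs (i + 1) j s ↔ (Src cs i j s ∨ (PySem.Chars.startswith (cs.drop i) s.toList = true ∧ i + s.length = j)) := by
  unfold Src
  rw [PySem.Chars.startswith_iff]
  constructor
  · rintro ⟨h1, h2, h3, h4⟩
    by_cases hlt : j - s.length < i
    · exact Or.inl ⟨h1, hlt, h3, h4⟩
    · have hji : j - s.length = i := by omega
      exact Or.inr ⟨hji ▸ h3, by omega⟩
  · rintro (⟨h1, h2, h3, h4⟩ | ⟨hsw, hij⟩)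
    · exact ⟨h1, by omega, h3, h4⟩
    · have hji : j - s.length = i := by omega
      exact ⟨by omega, by omega, hji ▸ hsw, hji ▸ hTl⟩

theorem src_range (cs : List Char) (i : Nat) (s : String) (hi : i ≤ cs.length)
    (hsw : PySem.Chars.startswith (cs.drop i) s.toList = true) : i + s.length ≤ cs.length := by
  have hpre := (PySem.Chars.startswith_iff _ _).mp hsw
  have := hpre.length_le
  rw [String.length_toList] at this
  simp [List.length_drop] at this
  omega

theorem getD_set_true (r : List Bool) (k j : Nat) :
    ((r.set k true).getD j false = true) ↔ ((k = j ∧ j < r.length) ∨ r.getD j false = true) := by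
  simp only [List.getD_eq_getElem?_getD, List.getElem?_set]
  by_cases hkj : k = j
  · subst hkj
    by_cases hk : k < r.length <;> simp [hk]
  · simp [hkj]

theorem getD_set_true' (r : List Bool) (k j : Nat) :
    ((r.set k true)[j]?.getD false = true) ↔ ((k = j ∧ j < r.length) ∨ r[j]?.getD false = true) := by
  have := getD_set_true r k j
  simpa [List.getD_eq_getElem?_getD] using this

theorem dpStep_getD (cs : List Char) (r : List Bool) (i j : Nat) (hri : r.getD i false = true) :
    ((dpStep cs r i).getD j false = true) ↔
      ((∃ s ∈ soundsA, PySem.Chars.startswith (cs.drop i) s.toList = true ∧ i + s.length = j ∧ j < r.length)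
        ∨ r.getD j false = true) := by
  have ha : ("aya" : String).toList = ['a','y','a'] := rfl
  have hal : ("aya" : String).length = 3 := rfl
  have hy : ("ye" : String).toList = ['y','e'] := rfl
  have hyl : ("ye" : String).length = 2 := rfl
  have hw : ("woo" : String).toList = ['w','o','o'] := rfl
  have hwl : ("woo" : String).length = 3 := rfl
  have hm : ("ma" : String).toList = ['m','a'] := rfl
  have hml : ("ma" : String).length = 2 := rfl
  unfold dpStep
  rw [if_pos hri]
  simp only [soundsA, List.foldl_cons, List.foldl_nil, ha, hal, hy, hyl, hw, hwl, hm, hml,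
    List.mem_cons, List.not_mem_nil, or_false, exists_eq_or_imp, exists_eq_left]
  split_ifs <;>
    simp [getD_set_true', List.length_set, *] <;> tauto

theorem dpStep_length (cs : List Char) (r : List Bool) (i : Nat) : (dpStep cs r i).length = r.length := by
  unfold dpStep
  split_ifs with h
  · simp only [soundsA, List.foldl_cons, List.foldl_nil]
    split_ifs <;> simp [List.length_set]
  · rfl

theorem sound_len_pos {s : String} (hs : s ∈ soundsA) : 0 < s.length := by
  rcases sound_len hs with h | h <;> omega

theorem PReach_self (cs : List Char) (i : Nat) (hi : i ≤ cs.length) :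
    PReach cs i i ↔ Tl (cs.take i) := by
  rw [← P_top cs i hi]
  unfold PReach Src
  constructor
  · rintro (h | ⟨s, hs, h1, h2, h3, h4⟩)
    · exact Or.inl h
    · exact Or.inr ⟨s, hs, h1, h3, h4⟩
  · rintro (h | ⟨s, hs, h1, h3, h4⟩)
    · exact Or.inl h
    · refine Or.inr ⟨s, hs, h1, ?_, h3, h4⟩
      have := sound_len_pos hs
      omega

theorem dp_inv (cs : List Char) : ∀ i, i ≤ cs.length →
    (((List.range i).foldl (dpStep cs) ((List.replicate (cs.length + 1) false).set 0 true)).length = cs.length + 1)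
    ∧ ∀ j, (((List.range i).foldl (dpStep cs) ((List.replicate (cs.length + 1) false).set 0 true)).getD j false = true
        ↔ PReach cs i j) := by
  intro i
  induction i with
  | zero =>
    intro _
    refine ⟨by simp, fun j => ?_⟩
    simp only [List.range_zero, List.foldl_nil]
    rw [getD_set_true]
    unfold PReach Src
    simp only [List.length_replicate]
    constructor
    · rintro (⟨rfl, _⟩ | habs)
      · exact Or.inl rfl
      · exfalso
        simp [List.getD_eq_getElem?_getD, List.getElem?_replicate] at habs
        split_ifs at habs <;> simp_all
    · rintro (rfl | ⟨s, hs, h1, h2, h3, h4⟩)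
      · exact Or.inl ⟨rfl, by omega⟩
      · omega
  | succ i ih =>
    intro hi1
    have hi : i ≤ cs.length := by omega
    obtain ⟨hlen, hinv⟩ := ih hi
    rw [List.range_succ, List.foldl_append, List.foldl_cons, List.foldl_nil]
    refine ⟨by rw [dpStep_length, hlen], fun j => ?_⟩
    have hreach : ((List.range i).foldl (dpStep cs) ((List.replicate (cs.length + 1) false).set 0 true)).getD i false = true
        ↔ Tl (cs.take i) := by
      rw [hinv i, PReach_self cs i hi]
    show (dpStep cs ((List.range i).foldl (dpStep cs) ((List.replicate (cs.length + 1) false).set 0 true)) i).getD j false = true ↔ PReach cs (i + 1) j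
    by_cases hri : ((List.range i).foldl (dpStep cs) ((List.replicate (cs.length + 1) false).set 0 true)).getD i false = true
    · rw [dpStep_getD cs _ i j hri]
      have hTl := hreach.mp hri
      unfold PReach
      constructor
      · rintro (⟨s, hs, hsw, hij, hjr⟩ | hold)
        · exact Or.inr ⟨s, hs, (src_succ cs i j s hTl (sound_len_pos hs)).mpr (Or.inr ⟨hsw, hij⟩)⟩
        · rcases (hinv j).mp hold with rfl | ⟨s, hs, hsrc⟩
          · exact Or.inl rfl
          · exact Or.inr ⟨s, hs, (src_succ cs i j s hTl (sound_len_pos hs)).mpr (Or.inl hsrc)⟩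
      · rintro (rfl | ⟨s, hs, hsrc⟩)
        · exact Or.inr ((hinv 0).mpr (Or.inl rfl))
        · rcases (src_succ cs i j s hTl (sound_len_pos hs)).mp hsrc with hold | ⟨hsw, hij⟩
          · exact Or.inr ((hinv j).mpr (Or.inr ⟨s, hs, hold⟩))
          · refine Or.inl ⟨s, hs, hsw, hij, ?_⟩
            have := src_range cs i s hi hsw
            omega
    · have hnotTl : ¬ Tl (cs.take i) := fun h => hri (hreach.mpr h)
      rw [show dpStep cs ((List.range i).foldl (dpStep cs) ((List.replicate (cs.length + 1) false).set 0 true)) i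
            = ((List.range i).foldl (dpStep cs) ((List.replicate (cs.length + 1) false).set 0 true)) from by
        rw [dpStep, if_neg hri]]
      rw [hinv j]
      unfold PReach Src
      constructor
      · rintro (rfl | ⟨s, hs, h1, h2, h3, h4⟩)
        · exact Or.inl rfl
        · exact Or.inr ⟨s, hs, h1, by omega, h3, h4⟩
      · rintro (rfl | ⟨s, hs, h1, h2, h3, h4⟩)
        · exact Or.inl rfl
        · by_cases hlt : j - s.length < i
          · exact Or.inr ⟨s, hs, h1, hlt, h3, h4⟩
          · exfalso
            have hji : j - s.length = i := by omega
            rw [hji] at h4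
            exact hnotTl h4

theorem tilable_iff (word : String) : tilable word = true ↔ Tl word.toList := by
  rw [tilable_def]
  obtain ⟨hlen, hinv⟩ := dp_inv word.toList word.toList.length le_rfl
  rw [hinv word.toList.length, PReach_self _ _ le_rfl, List.take_length]

theorem word_eq (word : String) :
    scanA word.toList (buildUsed word) word.toList.length 0 = tilable word := by
  have h1 := scanA_iff word word.toList.length 0 (by omega)
  have h2 := tilable_iff word
  simp only [List.drop_zero] at h1
  cases hA : scanA word.toList (buildUsed word) word.toList.length 0 <;>
    cases hB : tilable word <;> simp_all

-- the body of port A's fold, named for the proofs (definitionally equal to the lambda in `solution`)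
def stepA (st : Int × Bool) (word : String) : Int × Bool :=
  let used := buildUsed word
  let possible := if 0 < word.toList.length then scanA word.toList used word.toList.length 0 else st.2
  (if possible then st.1 + 1 else st.1, possible)

theorem fold_eq (l : List String) (hl : "" ∉ l) : ∀ (a : Int) (p : Bool),
    (l.foldl stepA (a, p)).1
    = l.foldl (fun acc word => acc + (if tilable word then 1 else 0)) a := by
  induction l with
  | nil => intro a p; rfl
  | cons w t ih =>
    intro a p
    have hw : w ≠ "" := fun h => hl (h ▸ List.mem_cons_self)
    have hwlen : 0 < w.toList.length := by
      rcases Nat.eq_zero_or_pos w.toList.length with h0 | h0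
      · exact absurd (by simpa using List.length_eq_zero_iff.mp h0) hw
      · exact h0
    have ht : "" ∉ t := fun h => hl (List.mem_cons_of_mem w h)
    have hwlen' : 0 < w.length := by simpa using hwlen
    have hw_eq : scanA w.toList (buildUsed w) w.length 0 = tilable w := by
      simpa using word_eq w
    have hstep : stepA (a, p) w = ((if tilable w then a + 1 else a), tilable w) := by
      simp [stepA, hwlen', hw_eq]
    rw [List.foldl_cons, List.foldl_cons, hstep]
    have harith : (if tilable w then a + 1 else a) = a + (if tilable w then 1 else 0) := by
      cases tilable w <;> simp
    rw [harith]
    exact ih ht _ _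

-- ===== VERDICT (by name: the statement is the Claim_ definition above) =====
theorem solution_spec : Claim_unchanged_solution := by
  intro babbling _ _ hnd
  unfold solution solution_alt
  exact fold_eq babbling hnd 0 false

theorem solution_changed : Claim_changed_solution := by
  unfold Claim_changed_solution; decide

@[simp] theorem solution_raises : Claim_raises_solution := by
  unfold Claim_raises_solution
  constructor
  · intro babbling _ h hpre; exact hpre h
  · exact ⟨by decide, by decide, by decide⟩
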